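-- pv_equiv track=rewrite | github.com/sidney2k1/array-problems-3 | main.py | getmaxlength
-- ===== SOURCE A (Python) =====
-- def getmaxlength(a,asize):
--     counter=0
--     maximum=0
--     for i in range(0,asize):
--         if a[i]==0:
--             counter=0
--         else:
--             counter+=1
--             maximum=max(maximum,counter)
--     return maximum
--
-- a=[1,0,1,0,1,1,1,1,0,1,0,0,0,0,0,1,0,1,1,1,1,1]
--
-- asize=len(a)
-- ===== SOURCE B (Python) =====
-- def getmaxlength(a, asize):
--     # Two-stage: run-length-encode the nonzero flags, then take the longest True run.
--     flags = [a[i] != 0 for i in range(asize)]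
--     runs = []
--     i = 0
--     while i < len(flags):
--         j = i
--         while j < len(flags) and flags[j] == flags[i]:
--             j += 1
--         runs.append((flags[i], j - i))
--         i = j
--     best = 0
--     for f, n in runs:
--         if f and n > best:
--             best = n
--     return best
-- ===== Notes on version B (the rewrite author's own statement) =====
-- stated objective: alternative
-- what changed: Replaces the running counter/maximum single pass with a two-stage computation: run-length-encode the nonzero flags of the first asize elements, then scan the runs for the longest True run.
import Mathlib
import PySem

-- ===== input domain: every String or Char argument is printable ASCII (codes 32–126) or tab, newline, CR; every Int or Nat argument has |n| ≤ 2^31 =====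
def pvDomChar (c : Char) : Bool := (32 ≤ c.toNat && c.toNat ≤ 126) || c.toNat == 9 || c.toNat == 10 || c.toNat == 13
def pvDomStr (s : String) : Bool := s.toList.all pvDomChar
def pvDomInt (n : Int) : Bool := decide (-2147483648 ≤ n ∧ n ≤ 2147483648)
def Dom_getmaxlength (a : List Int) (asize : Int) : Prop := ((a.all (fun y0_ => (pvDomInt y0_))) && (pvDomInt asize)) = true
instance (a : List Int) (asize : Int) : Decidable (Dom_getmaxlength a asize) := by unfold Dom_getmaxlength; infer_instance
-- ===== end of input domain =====

-- B replaces A's running counter/maximum pass by a two-stage computation (run-length-encode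
-- the nonzero flags, then scan the runs for the longest True run); same O(n) cost.


-- ===== PORT A =====
-- for i in range(0, asize): if a[i]==0: counter=0 else: counter+=1; maximum=max(maximum,counter)
-- a[i] is ported as pyGetD (total form); Pre_ guarantees every index is in range.
def getmaxlength (a : List Int) (asize : Int) : Int :=
  ((PySem.List.pyRange 0 asize 1).foldl
    (fun (s : Int × Int) i =>
      if PySem.List.pyGetD a i 0 = 0 then (0, s.2)
      else (s.1 + 1, max s.2 (s.1 + 1)))
    (0, 0)).2

-- ===== PORT B =====
-- inner while loop of Source B: length of the leading run of `b`s and the remainder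
def pvTakeRun (b : Bool) : List Bool → Nat × List Bool
  | [] => (0, [])
  | c :: t => if c = b then ((pvTakeRun b t).1 + 1, (pvTakeRun b t).2) else (0, c :: t)

theorem pvTakeRun_snd_length_le (b : Bool) (t : List Bool) :
    (pvTakeRun b t).2.length ≤ t.length := by
  induction t with
  | nil => simp [pvTakeRun]
  | cons c t ih => by_cases h : c = b <;> simp [pvTakeRun, h] <;> omega

-- outer while loop of Source B: the run-length encoding of the flag list
def pvGroups : List Bool → List (Bool × Nat)
  | [] => []
  | b :: t => (b, (pvTakeRun b t).1 + 1) :: pvGroups (pvTakeRun b t).2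
termination_by l => l.length
decreasing_by
  have := pvTakeRun_snd_length_le b t
  simp only [List.length_cons]
  omega

def getmaxlength_alt (a : List Int) (asize : Int) : Int :=
  let flags := (PySem.List.pyRange 0 asize 1).map
    (fun i => decide (PySem.List.pyGetD a i 0 ≠ 0))
  (pvGroups flags).foldl
    (fun (best : Int) g => if g.1 = true ∧ best < (g.2 : Int) then (g.2 : Int) else best) 0

-- ===== PRECONDITION & SPEC =====
-- Pre_ excludes asize > len(a), where both Pythons raise IndexError on a[i].
def Pre_getmaxlength (a : List Int) (asize : Int) : Prop := asize ≤ (a.length : Int)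
instance (a : List Int) (asize : Int) : Decidable (Pre_getmaxlength a asize) := by
  unfold Pre_getmaxlength; infer_instance

def pvWitness_getmaxlength : List Int × Int := ([1, 0, 1, 1, -2], 5)

def Spec_getmaxlength (a : List Int) (asize : Int) (out : Int) : Prop := out = getmaxlength_alt a asize
instance (a : List Int) (asize : Int) (out : Int) : Decidable (Spec_getmaxlength a asize out) := by unfold Spec_getmaxlength; infer_instance

-- ===== CLAIM (what is proved, stated in full; the proofs are below) =====
def Claim_equal_getmaxlength : Prop := ∀ (a : List Int) (asize : Int), Dom_getmaxlength a asize → Pre_getmaxlength a asize → Spec_getmaxlength a asize (getmaxlength a asize)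

-- ===== LEMMAS AND PROOFS =====

-- specification function: longest run of `true`s, given a current run of length c
def pvMaxRun : Int → List Bool → Int
  | _, [] => 0
  | c, true :: t => max (c + 1) (pvMaxRun (c + 1) t)
  | _, false :: t => pvMaxRun 0 t

theorem pvMaxRun_nonneg (L : List Bool) : ∀ c, 0 ≤ pvMaxRun c L := by
  induction L with
  | nil => intro c; simp [pvMaxRun]
  | cons b t ih =>
    intro c
    cases b <;> simp [pvMaxRun]
    · exact ih 0
    · exact Or.inr (ih (c + 1))

-- A's loop body on a flag
def pvStep (s : Int × Int) (b : Bool) : Int × Int :=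
  if b then (s.1 + 1, max s.2 (s.1 + 1)) else (0, s.2)

theorem pvFoldA (L : List Bool) : ∀ c m, 0 ≤ m →
    (L.foldl pvStep (c, m)).2 = max m (pvMaxRun c L) := by
  induction L with
  | nil => intro c m hm; simp [pvMaxRun]; omega
  | cons b t ih =>
    intro c m hm
    cases b
    · simpa [pvStep, pvMaxRun] using ih 0 m hm
    · have := ih (c + 1) (max m (c + 1)) (by omega)
      simp only [List.foldl_cons, pvStep, if_true, pvMaxRun] at this ⊢
      rw [this]
      omega

theorem pvTakeRun_maxRun_true (t : List Bool) : ∀ c,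
    pvMaxRun c (true :: t) = max (c + (pvTakeRun true t).1 + 1) (pvMaxRun 0 (pvTakeRun true t).2) := by
  induction t with
  | nil => intro c; simp [pvTakeRun, pvMaxRun]
  | cons d t ih =>
    intro c
    cases d
    · simp [pvTakeRun, pvMaxRun]
    · have h := ih (c + 1)
      simp only [pvTakeRun, if_true, pvMaxRun] at h ⊢
      push_cast at h ⊢
      omega

theorem pvTakeRun_maxRun_false (t : List Bool) :
    pvMaxRun 0 (false :: t) = pvMaxRun 0 (pvTakeRun false t).2 := by
  induction t with
  | nil => simp [pvTakeRun, pvMaxRun]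
  | cons d t ih =>
    cases d
    · simpa [pvTakeRun, pvMaxRun] using ih
    · simp [pvTakeRun, pvMaxRun]

-- the value of B's final loop, as a foldr
def pvBest : List (Bool × Nat) → Int
  | [] => 0
  | g :: gs => if g.1 then max (g.2 : Int) (pvBest gs) else pvBest gs

theorem pvFoldB (gs : List (Bool × Nat)) : ∀ best : Int, 0 ≤ best →
    gs.foldl (fun (best : Int) g => if g.1 = true ∧ best < (g.2 : Int) then (g.2 : Int) else best) best
      = max best (pvBest gs) := by
  induction gs with
  | nil => intro best h; simp [pvBest]; omega
  | cons g gs ih =>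
    intro best h
    cases hg : g.1
    · simp only [List.foldl_cons, hg, pvBest, Bool.false_eq_true, false_and, if_false]
      rw [ih best h]
    · simp only [List.foldl_cons, hg, pvBest, if_true, true_and]
      split_ifs with hlt
      · rw [ih _ (by positivity)]
        omega
      · rw [ih best h]
        omega

theorem pvBest_groups (L : List Bool) : pvBest (pvGroups L) = pvMaxRun 0 L := by
  induction L using pvGroups.induct with
  | case1 => simp [pvGroups, pvBest, pvMaxRun]
  | case2 b t ih =>
    cases b
    · rw [pvGroups]
      simp only [pvBest, Bool.false_eq_true, if_false]
      rw [ih, ← pvTakeRun_maxRun_false]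
    · rw [pvGroups]
      simp only [pvBest, if_true]
      rw [ih, pvTakeRun_maxRun_true t 0]
      push_cast
      omega

-- both ports reduce to pvMaxRun over the flag list of a.take asize.toNat
theorem pvA_eq (a : List Int) (asize : Int) (h : asize ≤ (a.length : Int)) :
    getmaxlength a asize = pvMaxRun 0 ((a.take asize.toNat).map (fun x => decide (x ≠ 0))) := by
  rcases le_or_gt asize 0 with hneg | hpos
  · rw [getmaxlength, PySem.List.pyRange_one_eq_nil hneg]
    have : asize.toNat = 0 := by omega
    simp [this, pvMaxRun]
  · set xs := a.take asize.toNat with hxs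
    have hlen : (xs.length : Int) = asize := by
      simp [hxs, List.length_take]; omega
    rw [getmaxlength, ← hlen]
    have hcongr : ∀ (s : Int × Int), ∀ i ∈ PySem.List.pyRange 0 (xs.length : Int) 1,
        (if PySem.List.pyGetD a i 0 = 0 then (0, s.2) else (s.1 + 1, max s.2 (s.1 + 1)))
          = (if PySem.List.pyGetD xs i 0 = 0 then (0, s.2) else (s.1 + 1, max s.2 (s.1 + 1))) := by
      intro s i hi
      rw [PySem.List.mem_pyRange_one] at hi
      have hia : i < (a.length : Int) := by omega
      have hix : i < (xs.length : Int) := hi.2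
      rw [PySem.List.pyGetD_eq_getElem a 0 hi.1 hia,
          PySem.List.pyGetD_eq_getElem xs 0 hi.1 hix]
      simp only [hxs, List.getElem_take]
    rw [PySem.List.foldl_congr_mem _ _ _ _ hcongr,
        PySem.List.foldl_pyRange_zero_pyGetD' xs 0
          (fun s v => if v = 0 then (0, s.2) else (s.1 + 1, max s.2 (s.1 + 1))) (0, 0)]
    have hmap : xs.foldl (fun (s : Int × Int) v => if v = 0 then (0, s.2) else (s.1 + 1, max s.2 (s.1 + 1))) (0, 0)
        = (xs.map (fun x => decide (x ≠ 0))).foldl pvStep (0, 0) := by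
      rw [List.foldl_map]
      apply PySem.List.foldl_congr_mem
      intro s x _
      by_cases hx : x = 0 <;> simp [pvStep, hx]
    rw [hmap, pvFoldA _ 0 0 le_rfl]
    have := pvMaxRun_nonneg (xs.map (fun x => decide (x ≠ 0))) 0
    omega

theorem pvB_eq (a : List Int) (asize : Int) (h : asize ≤ (a.length : Int)) :
    getmaxlength_alt a asize = pvMaxRun 0 ((a.take asize.toNat).map (fun x => decide (x ≠ 0))) := by
  rcases le_or_gt asize 0 with hneg | hpos
  · rw [getmaxlength_alt, PySem.List.pyRange_one_eq_nil hneg]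
    have : asize.toNat = 0 := by omega
    simp [this, pvGroups, pvMaxRun]
  · set xs := a.take asize.toNat with hxs
    have hlen : (xs.length : Int) = asize := by
      simp [hxs, List.length_take]; omega
    simp only [getmaxlength_alt]
    have hflags : (PySem.List.pyRange 0 asize 1).map (fun i => decide (PySem.List.pyGetD a i 0 ≠ 0))
        = xs.map (fun x => decide (x ≠ 0)) := by
      rw [← hlen]
      have hcongr : ∀ i ∈ PySem.List.pyRange 0 (xs.length : Int) 1,
          decide (PySem.List.pyGetD a i 0 ≠ 0) = decide (PySem.List.pyGetD xs i 0 ≠ 0) := by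
        intro i hi
        rw [PySem.List.mem_pyRange_one] at hi
        have hia : i < (a.length : Int) := by omega
        rw [PySem.List.pyGetD_eq_getElem a 0 hi.1 hia,
            PySem.List.pyGetD_eq_getElem xs 0 hi.1 hi.2]
        simp only [hxs, List.getElem_take]
      rw [List.map_congr_left hcongr]
      have : (fun i => decide (PySem.List.pyGetD xs i 0 ≠ 0))
          = (fun x => decide (x ≠ 0)) ∘ (fun j => PySem.List.pyGetD xs j 0) := rfl
      rw [this, ← List.map_map, PySem.List.map_pyGetD_pyRange_zero' xs 0]
    rw [hflags, pvFoldB _ 0 le_rfl, pvBest_groups]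
    have := pvMaxRun_nonneg (xs.map (fun x => decide (x ≠ 0))) 0
    omega

-- ===== VERDICT (by name: the statement is the Claim_ definition above) =====
theorem getmaxlength_spec : Claim_equal_getmaxlength := by
  intro a asize _ hpre
  unfold Spec_getmaxlength
  rw [pvA_eq a asize hpre, pvB_eq a asize hpre]
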